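-- pv_equiv track=rewrite | github.com/vgcman16/OpenZues | src/openzues/services/cortex.py | _recommended_toolsets
-- ===== SOURCE A (Python) =====
-- from collections import Counter, defaultdict
--
-- _BASELINE_TOOLSETS = {"safe", "skills", "file", "terminal"}
--
-- _TOOLSET_PRIORITY = {
--     "delegation": 0,
--     "debugging": 1,
--     "browser": 2,
--     "vision": 3,
--     "memory": 4,
--     "session_search": 5,
--     "search": 6,
--     "clarify": 7,
--     "messaging": 8,
--     "cronjob": 9,
--     "todo": 10,
--     "code_execution": 11,
--     "file": 12,
--     "terminal": 13,
--     "skills": 14,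
--     "safe": 15,
-- }
--
-- def _recommended_toolsets(counter: Counter[str]) -> list[str]:
--     if not counter:
--         return []
--     ranked = sorted(
--         counter.items(),
--         key=lambda item: (-item[1], _TOOLSET_PRIORITY.get(item[0], 99), item[0]),
--     )
--     meaningful = [name for name, _count in ranked if name not in _BASELINE_TOOLSETS]
--     if meaningful:
--         return meaningful[:4]
--     return [name for name, _count in ranked[:3]]
-- ===== SOURCE B (Python) =====
-- from collections import Counter, defaultdict
--
-- _BASELINE_TOOLSETS = {"safe", "skills", "file", "terminal"}
--
-- _TOOLSET_PRIORITY = {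
--     "delegation": 0,
--     "debugging": 1,
--     "browser": 2,
--     "vision": 3,
--     "memory": 4,
--     "session_search": 5,
--     "search": 6,
--     "clarify": 7,
--     "messaging": 8,
--     "cronjob": 9,
--     "todo": 10,
--     "code_execution": 11,
--     "file": 12,
--     "terminal": 13,
--     "skills": 14,
--     "safe": 15,
-- }
--
-- def _key(name, count):
--     return (-count, _TOOLSET_PRIORITY.get(name, 99), name)
--
-- def _bounded_insert(buf, entry, k):
--     # keep buf = the k best entries seen so far, in rank order (no sort call)
--     key = _key(*entry)
--     i = 0
--     while i < len(buf) and _key(*buf[i]) <= key: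
--         i += 1
--     buf.insert(i, entry)
--     del buf[k:]
--
-- def _recommended_toolsets(counter):
--     top_meaningful = []
--     top_baseline = []
--     for name, count in counter.items():
--         if name in _BASELINE_TOOLSETS:
--             _bounded_insert(top_baseline, (name, count), 3)
--         else:
--             _bounded_insert(top_meaningful, (name, count), 4)
--     chosen = top_meaningful if top_meaningful else top_baseline
--     return [name for name, _count in chosen]
-- ===== Notes on version B (the rewrite author's own statement) =====
-- stated objective: alternative
-- what changed: B never calls sort: it makes one pass over counter.items(), maintaining two bounded best-so-far buffers (top-4 meaningful, top-3 baseline) by in-place ordered insertion and truncation, then returns the names of the non-empty meaningful buffer or else the baseline buffer; A sorts the whole counter and then filters/slices the ranked list.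
import Mathlib
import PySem

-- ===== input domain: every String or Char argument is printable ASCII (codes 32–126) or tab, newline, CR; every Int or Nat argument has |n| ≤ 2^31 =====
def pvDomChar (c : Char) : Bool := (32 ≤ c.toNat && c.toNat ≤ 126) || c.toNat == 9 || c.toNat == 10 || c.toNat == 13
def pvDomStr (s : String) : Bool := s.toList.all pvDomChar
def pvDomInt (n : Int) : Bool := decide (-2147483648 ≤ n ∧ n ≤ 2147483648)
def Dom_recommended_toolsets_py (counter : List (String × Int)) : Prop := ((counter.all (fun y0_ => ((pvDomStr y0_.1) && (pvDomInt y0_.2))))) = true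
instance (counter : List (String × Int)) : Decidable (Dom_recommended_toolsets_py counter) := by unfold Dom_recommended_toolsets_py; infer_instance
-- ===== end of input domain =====

-- B replaces A's sort-everything-then-filter-and-slice by a single pass that maintains two
-- bounded best-so-far buffers (top-4 meaningful / top-3 baseline) via ordered insertion, no sort
-- call at all (objective: alternative).

-- ===== PORT A =====
-- _BASELINE_TOOLSETS (a Python set literal; only used for membership tests)
def pvBaseline : PySem.Set String := PySem.Set.ofList ["safe", "skills", "file", "terminal"]

-- _TOOLSET_PRIORITY
def pvPriority : PySem.Dict String Int := PySem.Dict.ofList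
  [("delegation", 0), ("debugging", 1), ("browser", 2), ("vision", 3), ("memory", 4),
   ("session_search", 5), ("search", 6), ("clarify", 7), ("messaging", 8), ("cronjob", 9),
   ("todo", 10), ("code_execution", 11), ("file", 12), ("terminal", 13), ("skills", 14), ("safe", 15)]

-- the sort key (-item[1], _TOOLSET_PRIORITY.get(item[0], 99), item[0]); the name component is
-- compared as List Char, which is exactly Python's string order (code-point lexicographic)
def pvRankKey (item : String × Int) : Lex (Int × Lex (Int × List Char)) :=
  toLex (-item.2, toLex (pvPriority.getD item.1 99, item.1.toList))

def recommended_toolsets_py (counter : List (String × Int)) : List String :=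
  if counter = [] then []
  else
    let ranked := PySem.List.sorted counter pvRankKey
    let meaningful := (ranked.filter (fun it => !(PySem.Set.contains pvBaseline it.1))).map (fun it => it.1)
    if meaningful ≠ [] then PySem.List.slice meaningful none (some 4)
    else (PySem.List.slice ranked none (some 3)).map (fun it => it.1)

-- ===== PORT B =====
-- Source B's _bounded_insert: scan past entries whose key is ≤ the new key, insert, truncate to k.
def pvIns (x : String × Int) : List (String × Int) → List (String × Int)
  | [] => [x]
  | y :: ys => if pvRankKey y ≤ pvRankKey x then y :: pvIns x ys else x :: y :: ys

def pvBoundedInsert (buf : List (String × Int)) (x : String × Int) (k : Nat) : List (String × Int) :=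
  (pvIns x buf).take k

def recommended_toolsets_py_alt (counter : List (String × Int)) : List String :=
  let st := counter.foldl
    (fun (acc : List (String × Int) × List (String × Int)) e =>
      if PySem.Set.contains pvBaseline e.1 then (acc.1, pvBoundedInsert acc.2 e 3)
      else (pvBoundedInsert acc.1 e 4, acc.2)) ([], [])
  (if st.1 ≠ [] then st.1 else st.2).map (fun it => it.1)

-- ===== PRECONDITION & SPEC =====
-- Pre_ excludes association lists with duplicate names: the Python argument is a Counter (a dict),
-- whose keys are unique, so such lists do not represent any actual input of A.
def Pre_recommended_toolsets_py (counter : List (String × Int)) : Prop :=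
  (counter.map Prod.fst).Nodup
instance (counter : List (String × Int)) : Decidable (Pre_recommended_toolsets_py counter) := by unfold Pre_recommended_toolsets_py; infer_instance

def pvWitness_recommended_toolsets_py : (List (String × Int)) :=
  [("browser", 2), ("safe", 1), ("todo", 1)]

def Spec_recommended_toolsets_py (counter : List (String × Int)) (out : List String) : Prop := out = recommended_toolsets_py_alt counter
instance (counter : List (String × Int)) (out : List String) : Decidable (Spec_recommended_toolsets_py counter out) := by unfold Spec_recommended_toolsets_py; infer_instance

-- ===== CLAIM (what is proved, stated in full; the proofs are below) =====
def Claim_equal_recommended_toolsets_py : Prop := ∀ (counter : List (String × Int)), Dom_recommended_toolsets_py counter → Pre_recommended_toolsets_py counter → Spec_recommended_toolsets_py counter (recommended_toolsets_py counter)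

-- ===== LEMMAS AND PROOFS =====

-- xs[:k] is List.take
theorem pv_slice_take3 {α : Type} (xs : List α) :
    PySem.List.slice xs none (some 3) = xs.take 3 := by
  have h := PySem.List.slice_to_natCast xs 3; norm_num at h; exact h

theorem pv_slice_take4 {α : Type} (xs : List α) :
    PySem.List.slice xs none (some 4) = xs.take 4 := by
  have h := PySem.List.slice_to_natCast xs 4; norm_num at h; exact h

-- equal rank keys force equal names
theorem pvRankKey_fst_eq {a b : String × Int} (h : pvRankKey a = pvRankKey b) : a.1 = b.1 := by
  unfold pvRankKey at h
  have h2 := congrArg (fun x : Lex (Int × Lex (Int × List Char)) => ((ofLex (ofLex x).2).2)) h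
  simp at h2
  exact String.toList_inj.mp h2

-- truncation commutes with ordered insertion
theorem pv_ins_take (x : String × Int) (s : List (String × Int)) (k : Nat) :
    (pvIns x (s.take k)).take k = (pvIns x s).take k := by
  induction s generalizing k with
  | nil => simp
  | cons y ys ih =>
    cases k with
    | zero => simp
    | succ k' =>
      simp only [List.take_succ_cons, pvIns]
      by_cases hy : pvRankKey y ≤ pvRankKey x
      · simp only [if_pos hy, List.take_succ_cons, ih k']
      · simp only [if_neg hy, List.take_succ_cons]
        cases k' with
        | zero => simp
        | succ n => simp [List.take_take]

-- Source B's loop over one buffer computes take k of the full insertion sort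
theorem pv_foldl_bounded (l : List (String × Int)) (s : List (String × Int)) (k : Nat) :
    l.foldl (fun acc e => pvBoundedInsert acc e k) (s.take k)
      = (l.foldl (fun acc e => pvIns e acc) s).take k := by
  induction l generalizing s with
  | nil => simp
  | cons x xs ih =>
    simp only [List.foldl_cons, pvBoundedInsert, pv_ins_take]
    exact ih (pvIns x s)

-- insertion keeps the list a permutation of its inputs
theorem pv_ins_perm (x : String × Int) (s : List (String × Int)) :
    (pvIns x s).Perm (x :: s) := by
  induction s with
  | nil => simp [pvIns]
  | cons y ys ih =>
    unfold pvIns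
    by_cases hy : pvRankKey y ≤ pvRankKey x
    · rw [if_pos hy]
      exact ((ih.cons y).trans (List.Perm.swap x y ys))
    · rw [if_neg hy]

theorem pv_isort_perm (l : List (String × Int)) (s : List (String × Int)) :
    (l.foldl (fun acc e => pvIns e acc) s).Perm (s ++ l) := by
  induction l generalizing s with
  | nil => simp
  | cons x xs ih =>
    simp only [List.foldl_cons]
    refine (ih (pvIns x s)).trans ?_
    have h1 : (pvIns x s ++ xs).Perm ((x :: s) ++ xs) := (pv_ins_perm x s).append_right xs
    refine h1.trans ?_
    simpa using (List.perm_middle (a := x) (l₁ := s) (l₂ := xs)).symm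

-- insertion preserves sortedness by the rank key
theorem pv_ins_pairwise (x : String × Int) (s : List (String × Int))
    (hs : s.Pairwise (fun a b => pvRankKey a ≤ pvRankKey b)) :
    (pvIns x s).Pairwise (fun a b => pvRankKey a ≤ pvRankKey b) := by
  induction s with
  | nil => simp [pvIns]
  | cons y ys ih =>
    rcases List.pairwise_cons.mp hs with ⟨hy, hys⟩
    unfold pvIns
    by_cases hc : pvRankKey y ≤ pvRankKey x
    · rw [if_pos hc]
      refine List.pairwise_cons.mpr ⟨?_, ih hys⟩
      intro b hb
      rcases (List.Perm.mem_iff (pv_ins_perm x ys)).mp hb with hbx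
      rcases List.mem_cons.mp hbx with h | h
      · exact h ▸ hc
      · exact hy b h
    · rw [if_neg hc]
      refine List.pairwise_cons.mpr ⟨?_, hs⟩
      intro b hb
      have hxy : pvRankKey x ≤ pvRankKey y := le_of_lt (lt_of_not_ge hc)
      rcases List.mem_cons.mp hb with h | h
      · exact h ▸ hxy
      · exact hxy.trans (hy b h)

theorem pv_isort_pairwise (l : List (String × Int)) :
    (l.foldl (fun acc e => pvIns e acc) []).Pairwise (fun a b => pvRankKey a ≤ pvRankKey b) := by
  suffices h : ∀ s, s.Pairwise (fun a b => pvRankKey a ≤ pvRankKey b) →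
      (l.foldl (fun acc e => pvIns e acc) s).Pairwise (fun a b => pvRankKey a ≤ pvRankKey b) by
    exact h [] (by simp)
  induction l with
  | nil => intro s hs; simpa using hs
  | cons x xs ih =>
    intro s hs
    simp only [List.foldl_cons]
    exact ih (pvIns x s) (pv_ins_pairwise x s hs)

-- Source B's hand-written insertion sort agrees with Python's sorted on lists with distinct names
theorem pv_isort_eq_sorted (l : List (String × Int)) (h : (l.map Prod.fst).Nodup) :
    l.foldl (fun acc e => pvIns e acc) [] = PySem.List.sorted l pvRankKey := by
  symm
  apply PySem.List.sorted_eq_of_perm_of_pairwise_lt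
  · simpa using pv_isort_perm l []
  · have hperm : (l.foldl (fun acc e => pvIns e acc) []).Perm l := by
      simpa using pv_isort_perm l []
    have hndm : ((l.foldl (fun acc e => pvIns e acc) []).map Prod.fst).Nodup :=
      ((hperm.map Prod.fst).nodup_iff).mpr h
    have hne : (l.foldl (fun acc e => pvIns e acc) []).Pairwise (fun a b => a.1 ≠ b.1) :=
      List.pairwise_map.mp hndm
    exact ((pv_isort_pairwise l).and hne).imp (fun hab =>
      lt_of_le_of_ne hab.1 (fun hk => hab.2 (pvRankKey_fst_eq hk)))

-- B's two-buffer pass = one bounded pass over each filter of the input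
theorem pv_two_buffer_fold (l : List (String × Int)) (m b : List (String × Int)) :
    l.foldl
      (fun (acc : List (String × Int) × List (String × Int)) e =>
        if PySem.Set.contains pvBaseline e.1 then (acc.1, pvBoundedInsert acc.2 e 3)
        else (pvBoundedInsert acc.1 e 4, acc.2)) (m, b)
    = ((l.filter (fun e => !(PySem.Set.contains pvBaseline e.1))).foldl
          (fun acc e => pvBoundedInsert acc e 4) m,
       (l.filter (fun e => PySem.Set.contains pvBaseline e.1)).foldl
          (fun acc e => pvBoundedInsert acc e 3) b) := by
  induction l generalizing m b with
  | nil => simp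
  | cons x xs ih =>
    rw [List.foldl_cons]
    by_cases hx : PySem.Set.contains pvBaseline x.1 = true
    · rw [if_pos hx, ih]
      simp at hx
      simp [hx]
    · rw [if_neg hx, ih]
      simp at hx
      simp [hx]

-- on a list with pairwise-distinct names, filtering commutes with the (stable) sort
theorem pv_sorted_filter (q : (String × Int) → Bool) (l : List (String × Int))
    (h : (l.map Prod.fst).Nodup) :
    PySem.List.sorted (l.filter q) pvRankKey = (PySem.List.sorted l pvRankKey).filter q := by
  apply PySem.List.sorted_eq_of_perm_of_pairwise_lt
  · exact List.Perm.filter q (PySem.List.sorted_perm l pvRankKey false)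
  · have hle := PySem.List.sorted_pairwise l pvRankKey
    have hndm : ((PySem.List.sorted l pvRankKey).map Prod.fst).Nodup :=
      ((List.Perm.map Prod.fst (PySem.List.sorted_perm l pvRankKey false)).nodup_iff).mpr h
    have hne : (PySem.List.sorted l pvRankKey).Pairwise (fun a b => a.1 ≠ b.1) :=
      List.pairwise_map.mp hndm
    have hlt : (PySem.List.sorted l pvRankKey).Pairwise
        (fun a b => pvRankKey a < pvRankKey b) :=
      (hle.and hne).imp (fun hab =>
        lt_of_le_of_ne hab.1 (fun hk => hab.2 (pvRankKey_fst_eq hk)))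
    exact hlt.sublist List.filter_sublist

-- ===== VERDICT (by name: the statement is the Claim_ definition above) =====
theorem recommended_toolsets_py_spec : Claim_equal_recommended_toolsets_py := by
  intro counter _ hpre
  unfold Spec_recommended_toolsets_py recommended_toolsets_py recommended_toolsets_py_alt
  simp only [pv_two_buffer_fold]
  have hnodM : ((counter.filter (fun e => !(PySem.Set.contains pvBaseline e.1))).map Prod.fst).Nodup :=
    (List.filter_sublist.map Prod.fst).nodup hpre
  have hnodB : ((counter.filter (fun e => PySem.Set.contains pvBaseline e.1)).map Prod.fst).Nodup :=
    (List.filter_sublist.map Prod.fst).nodup hpre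
  have hM : (counter.filter (fun e => !(PySem.Set.contains pvBaseline e.1))).foldl
      (fun acc e => pvBoundedInsert acc e 4) ([] : List (String × Int))
      = (PySem.List.sorted (counter.filter (fun e => !(PySem.Set.contains pvBaseline e.1))) pvRankKey).take 4 := by
    have h0 := pv_foldl_bounded (counter.filter (fun e => !(PySem.Set.contains pvBaseline e.1))) [] 4
    rw [pv_isort_eq_sorted _ hnodM] at h0
    simpa only [List.take_nil] using h0
  have hB : (counter.filter (fun e => PySem.Set.contains pvBaseline e.1)).foldl
      (fun acc e => pvBoundedInsert acc e 3) ([] : List (String × Int))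
      = (PySem.List.sorted (counter.filter (fun e => PySem.Set.contains pvBaseline e.1)) pvRankKey).take 3 := by
    have h0 := pv_foldl_bounded (counter.filter (fun e => PySem.Set.contains pvBaseline e.1)) [] 3
    rw [pv_isort_eq_sorted _ hnodB] at h0
    simpa only [List.take_nil] using h0
  rw [hM, hB]
  have hfs := pv_sorted_filter (fun e => !(PySem.Set.contains pvBaseline e.1)) counter hpre
  by_cases hc : counter = []
  · have hnil : PySem.List.sorted ([] : List (String × Int)) pvRankKey = [] :=
      (PySem.List.sorted_eq_nil_iff _ _ _).mpr rfl
    simp [hc, hnil]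
  · simp only [if_neg hc]
    by_cases hm : counter.filter (fun e => !(PySem.Set.contains pvBaseline e.1)) = []
    · -- no meaningful entries: baseline filter is the whole list
      have hall : ∀ e ∈ counter, PySem.Set.contains pvBaseline e.1 = true := by
        intro e he
        have := List.filter_eq_nil_iff.mp hm e he
        simpa using this
      have hbase : counter.filter (fun e => PySem.Set.contains pvBaseline e.1) = counter :=
        List.filter_eq_self.mpr hall
      have hmeanS : PySem.List.sorted (counter.filter (fun e => !(PySem.Set.contains pvBaseline e.1))) pvRankKey = [] := by
        rw [hm]; rfl
      have hmean : (PySem.List.sorted counter pvRankKey).filter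
          (fun it => !(PySem.Set.contains pvBaseline it.1)) = [] := by
        rw [← hfs, hmeanS]
      simp only [hmeanS, hmean, hbase, List.take_nil, List.map_nil, ne_eq, not_true_eq_false,
        if_false]
      rw [pv_slice_take3, List.map_take]
    · -- meaningful entries exist
      have hsne : PySem.List.sorted
          (counter.filter (fun e => !(PySem.Set.contains pvBaseline e.1))) pvRankKey ≠ [] := by
        rw [Ne, PySem.List.sorted_eq_nil_iff]
        exact hm
      have htne : (PySem.List.sorted
          (counter.filter (fun e => !(PySem.Set.contains pvBaseline e.1))) pvRankKey).take 4 ≠ [] := by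
        simpa using hsne
      have hAne : ((PySem.List.sorted counter pvRankKey).filter
          (fun it => !(PySem.Set.contains pvBaseline it.1))).map (fun it => it.1) ≠ [] := by
        rw [← hfs]
        simpa using hsne
      simp only [htne, hAne, ne_eq, not_false_eq_true, if_pos]
      rw [pv_slice_take4, hfs, List.map_take]
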